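-- pv_equiv track=rewrite | github.com/sesh10/Problem-Statements | subarray_with_target_sum.py | find_continuous_k
-- ===== SOURCE A (Python) =====
-- def find_continuous_k(list, k):
--     # Fill this in.
--     ans = []
--     for i in range(len(list)-1):
--         c = list[i]
--         for j in range(i+1,len(list)):
--             c += list[j]
--             if c == k:
--                 return list[i:j+1]
-- ===== SOURCE B (Python) =====
-- def find_continuous_k(list, k):
--     n = len(list)
--     prefix = [0]
--     for x in list:
--         prefix.append(prefix[-1] + x)
--     positions = {}
--     for t in range(n + 1):
--         positions.setdefault(prefix[t], []).append(t)
--     for i in range(n - 1):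
--         for t in positions.get(prefix[i] + k, []):
--             if t >= i + 2:
--                 return list[i:t]
--     return None
-- ===== Notes on version B (the rewrite author's own statement) =====
-- stated objective: faster
-- what changed: Replaces the nested accumulate-and-scan over all (i,j) pairs by one prefix-sum array plus a hash index mapping each prefix value to its ascending positions, so for each start i only the positions whose prefix value equals prefix[i]+k are examined.
import Mathlib
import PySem

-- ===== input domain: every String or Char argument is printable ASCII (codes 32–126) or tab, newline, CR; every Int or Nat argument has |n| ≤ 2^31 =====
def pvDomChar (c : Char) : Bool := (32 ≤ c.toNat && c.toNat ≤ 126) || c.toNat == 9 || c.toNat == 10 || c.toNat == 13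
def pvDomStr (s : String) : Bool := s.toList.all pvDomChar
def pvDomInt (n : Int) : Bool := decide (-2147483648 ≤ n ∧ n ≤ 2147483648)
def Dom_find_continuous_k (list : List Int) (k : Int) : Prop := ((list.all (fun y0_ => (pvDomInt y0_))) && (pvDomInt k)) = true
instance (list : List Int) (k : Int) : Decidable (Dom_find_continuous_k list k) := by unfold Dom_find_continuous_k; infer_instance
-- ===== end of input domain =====

-- B replaces A's nested scan over all (i,j) pairs by a prefix-sum array plus a
-- hash index from prefix value to its ascending positions (typically faster; same results).


-- ===== PORT A =====
-- inner loop: 'for j in range(i+1, len(list)): c += list[j]; if c == k: return list[i:j+1]'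
def fckInner (list : List Int) (k : Int) (i : Int) : Int → List Int → Option (List Int)
  | _, [] => none
  | c, j :: js =>
    let c' := c + PySem.List.pyGetD list j 0
    if c' = k then some (PySem.List.slice list (some i) (some (j + 1)))
    else fckInner list k i c' js

-- outer loop: 'for i in range(len(list)-1): c = list[i]; <inner>'
def fckOuter (list : List Int) (k : Int) : List Int → Option (List Int)
  | [] => none
  | i :: is =>
    match fckInner list k i (PySem.List.pyGetD list i 0) (PySem.List.pyRange (i + 1) (list.length : Int)) with
    | some r => some r
    | none => fckOuter list k is

def find_continuous_k (list : List Int) (k : Int) : Option (List Int) :=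
  fckOuter list k (PySem.List.pyRange 0 ((list.length : Int) - 1))

-- ===== PORT B =====
-- 'prefix = [0]; for x in list: prefix.append(prefix[-1] + x)'
def fckPrefix (list : List Int) : List Int :=
  list.foldl (fun p x => p ++ [PySem.List.pyGetD p (-1) 0 + x]) [0]

-- 'positions = {}; for t in range(n+1): positions.setdefault(prefix[t], []).append(t)'
def fckPositions (pfx : List Int) (n : Int) : PySem.Dict Int (List Int) :=
  (PySem.List.pyRange 0 (n + 1)).foldl
    (fun d t => d.modify (PySem.List.pyGetD pfx t 0) [] (fun ts => ts ++ [t]))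
    PySem.Dict.empty

-- 'for t in positions.get(prefix[i]+k, []): if t >= i+2: return list[i:t]'
def fckAltScan (i : Int) : List Int → Option Int
  | [] => none
  | t :: ts => if i + 2 ≤ t then some t else fckAltScan i ts

-- 'for i in range(n-1): <inner>'
def fckAltOuter (list : List Int) (k : Int) (pfx : List Int) (pos : PySem.Dict Int (List Int)) : List Int → Option (List Int)
  | [] => none
  | i :: is =>
    match fckAltScan i (pos.getD (PySem.List.pyGetD pfx i 0 + k) []) with
    | some t => some (PySem.List.slice list (some i) (some t))
    | none => fckAltOuter list k pfx pos is

def find_continuous_k_alt (list : List Int) (k : Int) : Option (List Int) :=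
  let n : Int := (list.length : Int)
  let pfx := fckPrefix list
  let pos := fckPositions pfx n
  fckAltOuter list k pfx pos (PySem.List.pyRange 0 (n - 1))

-- ===== PRECONDITION & SPEC =====
def Spec_find_continuous_k (list : List Int) (k : Int) (out : Option (List Int)) : Prop := out = find_continuous_k_alt list k
instance (list : List Int) (k : Int) (out : Option (List Int)) : Decidable (Spec_find_continuous_k list k out) := by unfold Spec_find_continuous_k; infer_instance

-- ===== CLAIM (what is proved, stated in full; the proofs are below) =====
def Claim_equal_find_continuous_k : Prop := ∀ (list : List Int) (k : Int), Dom_find_continuous_k list k → Spec_find_continuous_k list k (find_continuous_k list k)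

-- ===== LEMMAS AND PROOFS =====

-- partial sum of the first t elements
def fckS (list : List Int) (t : Nat) : Int := (list.take t).sum

theorem fckS_succ (list : List Int) (t : Nat) (ht : t < list.length) :
    fckS list (t + 1) = fckS list t + list[t] := by
  exact List.sum_take_succ list t ht

theorem fckS_zero (l : List Int) : fckS l 0 = 0 := rfl

theorem fckS_cons (x : Int) (l : List Int) (j : Nat) : fckS (x :: l) (j + 1) = x + fckS l j := by
  simp [fckS]

theorem fckPrefix_fold (list : List Int) : ∀ (acc : List Int),
    list.foldl (fun p x => p ++ [PySem.List.pyGetD p (-1) 0 + x]) acc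
      = acc ++ (List.range list.length).map
          (fun j => PySem.List.pyGetD acc (-1) 0 + fckS list (j + 1)) := by
  induction list with
  | nil => intro acc; simp
  | cons x l ih =>
    intro acc
    simp only [List.foldl_cons]
    rw [ih]
    rw [PySem.List.pyGetD_neg_one_append_singleton]
    rw [List.length_cons, List.range_succ_eq_map]
    simp only [List.map_cons, List.map_map]
    rw [List.append_assoc]
    congr 1
    simp only [List.singleton_append]
    congr 1
    · rw [fckS_cons, fckS_zero, add_zero]
    · apply List.map_congr_left
      intro j _
      simp only [Function.comp_apply, Nat.succ_eq_add_one]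
      rw [fckS_cons]
      ring

theorem fckPrefix_eq (list : List Int) :
    fckPrefix list = (List.range (list.length + 1)).map (fckS list) := by
  unfold fckPrefix
  rw [fckPrefix_fold, List.range_succ_eq_map]
  simp only [List.map_cons, List.map_map, List.singleton_append]
  congr 1
  apply List.map_congr_left
  intro j _
  have : (PySem.List.pyGet? [(0:Int)] (-1)).getD 0 = 0 := by decide
  simp [PySem.List.pyGetD, this]

theorem fckPrefix_get (list : List Int) (t : Nat) (ht : t ≤ list.length) :
    PySem.List.pyGetD (fckPrefix list) (t : Int) 0 = fckS list t := by
  rw [PySem.List.pyGetD_natCast, fckPrefix_eq]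
  exact PySem.List.getD_map_range _ _ _ _ (by omega)

theorem fckPositions_fold (g : Int → Int) (v : Int) : ∀ (ts : List Int) (d : PySem.Dict Int (List Int)),
    (ts.foldl (fun d t => d.modify (g t) [] (fun l => l ++ [t])) d).getD v []
      = d.getD v [] ++ ts.filter (fun t => g t == v) := by
  intro ts
  induction ts with
  | nil => intro d; simp
  | cons t ts ih =>
    intro d
    simp only [List.foldl_cons, List.filter_cons]
    rw [ih]
    rw [PySem.Dict.getD_modify]
    by_cases h : g t = v
    · simp [h]
    · simp [h, Ne.symm h]

theorem fckPositions_getD (list : List Int) (v : Int) :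
    (fckPositions (fckPrefix list) (list.length : Int)).getD v []
      = ((List.range (list.length + 1)).filter (fun t => fckS list t == v)).map (fun t : Nat => (t : Int)) := by
  unfold fckPositions
  rw [fckPositions_fold]
  have hr : ((list.length : Int) + 1) = ((list.length + 1 : Nat) : Int) := by push_cast; ring
  rw [hr, PySem.List.pyRange_zero_natCast]
  rw [List.filter_map]
  simp only [PySem.Dict.getD_empty, List.nil_append]
  have hfc : ∀ t ∈ List.range (list.length + 1),
      ((fun t : Int => PySem.List.pyGetD (fckPrefix list) t 0 == v) ∘ (fun k : Nat => (k : Int))) t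
        = (fckS list t == v) := by
    intro t ht
    simp only [Function.comp_apply]
    rw [fckPrefix_get list t (Nat.lt_succ_iff.mp (List.mem_range.mp ht))]
  rw [List.filter_congr hfc]

theorem fckAltScan_eq_find? (i : Int) : ∀ (ts : List Int),
    fckAltScan i ts = ts.find? (fun t => i + 2 ≤ t) := by
  intro ts
  induction ts with
  | nil => rfl
  | cons t ts ih =>
    simp only [fckAltScan, List.find?_cons]
    by_cases h : i + 2 ≤ t
    · simp [h]
    · simp [h, ih]

theorem fckRange_nil (a b : Int) (h : b ≤ a) : PySem.List.pyRange a b = [] := by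
  simp [PySem.List.pyRange]
  omega

theorem fckInner_eq (list : List Int) (k : Int) (iN : Nat) :
    ∀ (len mN : Nat), mN + len = list.length → iN < mN →
    fckInner list k (iN : Int) (fckS list mN - fckS list iN) (PySem.List.pyRange (mN : Int) (list.length : Int))
      = ((List.range' mN len).find? (fun j => fckS list (j + 1) == fckS list iN + k)).map
          (fun j => PySem.List.slice list (some (iN : Int)) (some ((j : Int) + 1))) := by
  intro len
  induction len with
  | zero =>
    intro mN hsum _
    rw [fckRange_nil _ _ (by omega), List.range'_zero]
    rfl
  | succ len ih =>
    intro mN hsum him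
    have hmlt : mN < list.length := by omega
    rw [PySem.List.pyRange_one_cons (by exact_mod_cast hmlt)]
    rw [List.range'_succ]
    simp only [fckInner, List.find?_cons]
    have hget : PySem.List.pyGetD list (mN : Int) 0 = list[mN] := by
      rw [PySem.List.pyGetD_natCast]
      exact List.getD_eq_getElem list 0 hmlt
    have hc : fckS list mN - fckS list iN + PySem.List.pyGetD list (mN : Int) 0
        = fckS list (mN + 1) - fckS list iN := by
      rw [hget, fckS_succ list mN hmlt]; ring
    rw [hc]
    by_cases h : fckS list (mN + 1) = fckS list iN + k
    · have hcond : fckS list (mN + 1) - fckS list iN = k := by omega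
      simp only [hcond]
      have : (fckS list (mN + 1) == fckS list iN + k) = true := by simpa using h
      rw [this]
      simp
    · have hcond : ¬ (fckS list (mN + 1) - fckS list iN = k) := by omega
      rw [if_neg hcond]
      have hb : (fckS list (mN + 1) == fckS list iN + k) = false := by simpa using h
      rw [hb]
      simp only []
      have hcast : (mN : Int) + 1 = ((mN + 1 : Nat) : Int) := by push_cast; ring
      rw [hcast]
      exact ih (mN + 1) (by omega) (by omega)

theorem fckFind_drop (p : Nat → Bool) (b : Nat) : ∀ (len s : Nat), b ≤ s →
    (List.range' s len).find? (fun t => p t && decide (b ≤ t))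
      = (List.range' s len).find? p := by
  intro len
  induction len with
  | zero => intro s _; rfl
  | succ len ih =>
    intro s hbs
    rw [List.range'_succ, List.find?_cons, List.find?_cons]
    have : decide (b ≤ s) = true := by simpa using hbs
    rw [this, Bool.and_true]
    cases hp : p s
    · exact ih (s + 1) (by omega)
    · rfl

theorem fckFind_head_none (p : Nat → Bool) (b : Nat) (len s : Nat) (h : s + len ≤ b) :
    (List.range' s len).find? (fun t => p t && decide (b ≤ t)) = none := by
  rw [List.find?_eq_none]
  intro t ht
  have := List.mem_range'_1.mp ht
  simp only [Bool.and_eq_true, decide_eq_true_eq]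
  rintro ⟨-, hbt⟩
  omega

theorem fckFind_shift (q : Nat → Bool) : ∀ (len s : Nat),
    (List.range' (s + 1) len).find? q
      = ((List.range' s len).find? (fun j => q (j + 1))).map (fun j => j + 1) := by
  intro len
  induction len with
  | zero => intro s; rfl
  | succ len ih =>
    intro s
    rw [List.range'_succ, List.range'_succ, List.find?_cons, List.find?_cons]
    cases hq : q (s + 1)
    · exact ih (s + 1)
    · rfl

theorem fckB_find (iN : Nat) (L : List Nat) :
    List.find? (fun t : Int => (iN : Int) + 2 ≤ t) (L.map (fun t : Nat => (t : Int)))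
      = (L.find? (fun t => decide (iN + 2 ≤ t))).map (fun t : Nat => (t : Int)) := by
  induction L with
  | nil => rfl
  | cons t L ih =>
    simp only [List.map_cons, List.find?_cons]
    have hd : decide ((iN : Int) + 2 ≤ (t : Int)) = decide (iN + 2 ≤ t) := by
      simp only [decide_eq_decide]
      constructor
      · intro h; exact_mod_cast h
      · intro h; exact_mod_cast h
    rw [hd]
    cases hdec : decide (iN + 2 ≤ t)
    · exact ih
    · rfl

theorem fck_inner_agree (list : List Int) (k : Int) (iN : Nat) (hi : iN + 1 < list.length) :
    fckInner list k (iN : Int) (PySem.List.pyGetD list (iN : Int) 0) (PySem.List.pyRange ((iN : Int) + 1) (list.length : Int))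
      = (fckAltScan (iN : Int) ((fckPositions (fckPrefix list) (list.length : Int)).getD (PySem.List.pyGetD (fckPrefix list) (iN : Int) 0 + k) [])).map
          (fun t => PySem.List.slice list (some (iN : Int)) (some t)) := by
  have hget : PySem.List.pyGetD list (iN : Int) 0 = fckS list (iN + 1) - fckS list iN := by
    rw [PySem.List.pyGetD_natCast, List.getD_eq_getElem list 0 (by omega)]
    rw [fckS_succ list iN (by omega)]; ring
  rw [hget]
  have hcast : (iN : Int) + 1 = ((iN + 1 : Nat) : Int) := by push_cast; ring
  rw [hcast]
  rw [fckInner_eq list k iN (list.length - iN - 1) (iN + 1) (by omega) (by omega)]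
  rw [fckPrefix_get list iN (by omega)]
  rw [fckPositions_getD]
  rw [fckAltScan_eq_find?]
  rw [fckB_find]
  rw [List.find?_filter]
  have hpred2 : (fun a : Nat => decide ((fckS list a == fckS list iN + k) = true ∧ (decide (iN + 2 ≤ a)) = true))
      = (fun a : Nat => (fckS list a == fckS list iN + k) && decide (iN + 2 ≤ a)) := by
    funext a
    cases h1 : (fckS list a == fckS list iN + k) <;> cases h2 : decide (iN + 2 ≤ a) <;> simp_all
  rw [hpred2]
  rw [List.range_eq_range']
  have hsplit : List.range' 0 (list.length + 1)
      = List.range' 0 (iN + 2) ++ List.range' (iN + 2) (list.length - iN - 1) := by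
    have h := @List.range'_append 0 (iN + 2) (list.length - iN - 1) 1
    simp only [one_mul, Nat.zero_add] at h
    rw [h]
    congr 1
    omega
  rw [hsplit, List.find?_append, fckFind_head_none _ _ _ _ (by omega), Option.none_or]
  rw [fckFind_drop _ _ _ _ (le_refl _)]
  conv_rhs => rw [show iN + 2 = (iN + 1) + 1 from rfl, fckFind_shift]
  cases hfind : (List.range' (iN + 1) (list.length - iN - 1)).find?
      (fun j => fckS list (j + 1) == fckS list iN + k) with
  | none => rfl
  | some j =>
    simp only [Option.map_some]
    congr 2

theorem fck_outer_agree (list : List Int) (k : Int) : ∀ (is : List Int),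
    (∀ i ∈ is, 0 ≤ i ∧ i < (list.length : Int) - 1) →
    fckOuter list k is = fckAltOuter list k (fckPrefix list) (fckPositions (fckPrefix list) (list.length : Int)) is := by
  intro is
  induction is with
  | nil => intro _; rfl
  | cons i is ih =>
    intro hmem
    obtain ⟨h0, h1⟩ := hmem i (List.mem_cons_self)
    obtain ⟨iN, rfl⟩ : ∃ m : Nat, i = (m : Int) := ⟨i.toNat, (Int.toNat_of_nonneg h0).symm⟩
    have hiN : iN + 1 < list.length := by
      have : (iN : Int) < (list.length : Int) - 1 := h1
      omega
    simp only [fckOuter, fckAltOuter]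
    rw [fck_inner_agree list k iN hiN]
    cases hscan : fckAltScan (iN : Int)
        ((fckPositions (fckPrefix list) (list.length : Int)).getD
          (PySem.List.pyGetD (fckPrefix list) (iN : Int) 0 + k) []) with
    | none => exact ih (fun j hj => hmem j (List.mem_cons_of_mem _ hj))
    | some t => rfl

-- ===== VERDICT (by name: the statement is the Claim_ definition above) =====
theorem find_continuous_k_spec : Claim_equal_find_continuous_k := by
  intro list k _
  unfold Spec_find_continuous_k find_continuous_k find_continuous_k_alt
  exact fck_outer_agree list k _ (fun i hi => by
    have := PySem.List.mem_pyRange_one.mp hi; exact ⟨this.1, this.2⟩)
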